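-- pv_equiv track=rewrite | github.com/drkplaya777/bctci | grids and matrices/queens_reach_optimal.py | safe_cells
-- ===== SOURCE A (Python) =====
-- def safe_cells(board):
--     n = len(board)
--     res = [[0] * n for _ in range(n)]
--     for r in range(n):
--         for c in range(n):
--             if board[r][c] == 1:
--                 res[r][c] = 1
--                 mark_reachable_cells(board, r, c, res)
--     return res
--
-- def mark_reachable_cells(board, r, c, result):
--     directions = [
--         [-1, 0], [1, 0], [0, -1], [0, 1], # up/down; left/right
--         [-1, -1], [-1, 1], [1, -1], [1, 1] # diagonals
--     ]
--     for dir_r, dir_c in directions: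
--         new_r, new_c = r + dir_r, c + dir_c
--         while is_valid(board, new_r, new_c):
--             result[new_r][new_c] = 1
--             new_r += dir_r
--             new_c += dir_c
--
-- def is_valid(board, r, c):
--     return 0 <= r < len(board) and 0 <= c < len(board) and board[r][c] != 1
-- ===== SOURCE B (Python) =====
-- def safe_cells(board):
--     n = len(board)
--     rows, cols, diags, antis = set(), set(), set(), set()
--     for r in range(n):
--         for c in range(n):
--             if board[r][c] == 1:
--                 rows.add(r)
--                 cols.add(c)
--                 diags.add(r - c)
--                 antis.add(r + c)
--     return [[1 if (r in rows or c in cols or (r - c) in diags or (r + c) in antis) else 0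
--              for c in range(n)] for r in range(n)]
-- ===== Notes on version B (the rewrite author's own statement) =====
-- stated objective: simpler
-- what changed: Replaces the per-queen 8-direction ray casting with blocking by one scan that collects the occupied row/column/diagonal/anti-diagonal index sets followed by a flat membership pass over all cells.
import Mathlib
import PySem

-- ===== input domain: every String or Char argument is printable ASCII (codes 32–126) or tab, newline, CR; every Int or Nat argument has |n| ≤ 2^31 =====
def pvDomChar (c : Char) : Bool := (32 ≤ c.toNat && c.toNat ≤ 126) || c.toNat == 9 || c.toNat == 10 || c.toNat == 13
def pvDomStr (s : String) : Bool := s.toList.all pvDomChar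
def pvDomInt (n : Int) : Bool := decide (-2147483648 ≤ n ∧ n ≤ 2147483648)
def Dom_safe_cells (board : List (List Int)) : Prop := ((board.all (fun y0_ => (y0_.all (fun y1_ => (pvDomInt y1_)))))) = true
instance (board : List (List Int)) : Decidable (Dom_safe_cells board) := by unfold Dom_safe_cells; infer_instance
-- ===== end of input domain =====

-- B replaces A's per-queen 8-direction ray casting by one scan collecting occupied
-- row/column/diagonal/anti-diagonal index sets and a flat membership pass (objective: simpler).

-- ===== PORT A =====
-- board[r][c] (indices known in range on admitted inputs; getD is exact there)
def pvGetB (board : List (List Int)) (r c : Nat) : Int := (board.getD r []).getD c 0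

-- result[r][c] = 1
def pvSetCell (res : List (List Int)) (r c : Nat) : List (List Int) :=
  res.modify r (fun row => row.set c 1)

-- is_valid(board, r, c)
def pvIsValid (board : List (List Int)) (r c : Int) : Bool :=
  decide (0 ≤ r ∧ r < (board.length : Int) ∧ 0 ≤ c ∧ c < (board.length : Int) ∧
          pvGetB board r.toNat c.toNat ≠ 1)

-- the while loop of mark_reachable_cells, with fuel n = board.length (the walk stays on
-- the board, so it takes fewer than n steps; with fuel n the recursion equals the while loop)
def pvRay (board : List (List Int)) (dr dc : Int) :
    Nat → Int → Int → List (List Int) → List (List Int)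
  | 0, _, _, res => res
  | fuel+1, r, c, res =>
    if pvIsValid board r c then
      pvRay board dr dc fuel (r + dr) (c + dc) (pvSetCell res r.toNat c.toNat)
    else res

def pvDirs : List (Int × Int) :=
  [(-1,0), (1,0), (0,-1), (0,1), (-1,-1), (-1,1), (1,-1), (1,1)]

-- mark_reachable_cells(board, r, c, result)
def pvMark (board : List (List Int)) (r c : Int) (res : List (List Int)) : List (List Int) :=
  pvDirs.foldl (fun res d => pvRay board d.1 d.2 board.length (r + d.1) (c + d.2) res) res

def safe_cells (board : List (List Int)) : List (List Int) :=
  let n := board.length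
  (List.range n).foldl (fun res r =>
    (List.range n).foldl (fun res c =>
      if pvGetB board r c = 1 then
        pvMark board (r : Int) (c : Int) (pvSetCell res r c)
      else res) res)
    (List.replicate n (List.replicate n 0))

-- ===== PORT B =====
def safe_cells_alt (board : List (List Int)) : List (List Int) :=
  let n := board.length
  let st : PySem.Set Int × PySem.Set Int × PySem.Set Int × PySem.Set Int := (List.range n).foldl (fun st r =>
    (List.range n).foldl (fun st c =>
      if pvGetB board r c = 1 then
        (PySem.Set.add st.1 (r : Int), PySem.Set.add st.2.1 (c : Int),
         PySem.Set.add st.2.2.1 ((r : Int) - (c : Int)), PySem.Set.add st.2.2.2 ((r : Int) + (c : Int)))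
      else st) st)
    ((PySem.Set.empty, PySem.Set.empty, PySem.Set.empty, PySem.Set.empty) : (PySem.Set Int × PySem.Set Int × PySem.Set Int × PySem.Set Int))
  (List.range n).map (fun (r : Nat) => (List.range n).map (fun (c : Nat) =>
    if PySem.Set.contains st.1 (r : Int) || PySem.Set.contains st.2.1 (c : Int) ||
       PySem.Set.contains st.2.2.1 ((r : Int) - (c : Int)) ||
       PySem.Set.contains st.2.2.2 ((r : Int) + (c : Int)) then 1 else 0))

-- ===== PRECONDITION & SPEC =====
-- Python A raises IndexError when some row is shorter than the board (board[r][c] for c < n);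
-- Pre_ admits exactly the boards on which A returns (every row at least n = len(board) long).
def Pre_safe_cells (board : List (List Int)) : Prop :=
  ∀ row ∈ board, board.length ≤ row.length
instance (board : List (List Int)) : Decidable (Pre_safe_cells board) := by
  unfold Pre_safe_cells; infer_instance

def pvWitness_safe_cells : List (List Int) := [[1, 0], [0, 0]]

def Spec_safe_cells (board : List (List Int)) (out : List (List Int)) : Prop := out = safe_cells_alt board
instance (board : List (List Int)) (out : List (List Int)) : Decidable (Spec_safe_cells board out) := by unfold Spec_safe_cells; infer_instance

-- ===== CLAIM (what is proved, stated in full; the proofs are below) =====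
def Claim_equal_safe_cells : Prop := ∀ (board : List (List Int)), Dom_safe_cells board → Pre_safe_cells board → Spec_safe_cells board (safe_cells board)

-- ===== LEMMAS AND PROOFS =====

-- value of a result grid at (x, y)
def getR (res : List (List Int)) (x y : Nat) : Int := (res.getD x []).getD y 0

-- n×n shape invariant of A's result grid
def Shaped (n : Nat) (res : List (List Int)) : Prop :=
  res.length = n ∧ ∀ row ∈ res, row.length = n

-- queen at (r, c)
def Qn (b : List (List Int)) (r c : Nat) : Prop :=
  r < b.length ∧ c < b.length ∧ pvGetB b r c = 1

-- the cell shares a row, column, diagonal or anti-diagonal with some queen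
def LineM (b : List (List Int)) (x y : Nat) : Prop :=
  ∃ r c : Nat, Qn b r c ∧
    ((x : Int) = r ∨ (y : Int) = c ∨
     (x : Int) - (y : Int) = (r : Int) - (c : Int) ∨
     (x : Int) + (y : Int) = (r : Int) + (c : Int))

-- the while loop from start (s0,t0) marks exactly positions s0+k·dr, t0+k·dc with a valid prefix
def RayPre (b : List (List Int)) (dr dc s0 t0 : Int) (k : Nat) : Prop :=
  ∀ j : Nat, j ≤ k → pvIsValid b (s0 + j * dr) (t0 + j * dc) = true

def RayHits (b : List (List Int)) (dr dc s0 t0 : Int) (f : Nat) (x y : Nat) : Prop :=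
  ∃ k : Nat, k < f ∧ (x : Int) = s0 + k * dr ∧ (y : Int) = t0 + k * dc ∧ RayPre b dr dc s0 t0 k

-- all cells A ever writes
def AWrites (b : List (List Int)) (p : Nat × Nat) (x y : Nat) : Prop :=
  pvGetB b p.1 p.2 = 1 ∧
    ((x, y) = p ∨ ∃ d ∈ pvDirs,
      RayHits b d.1 d.2 ((p.1 : Int) + d.1) ((p.2 : Int) + d.2) b.length x y)

def pvPairs (n : Nat) : List (Nat × Nat) :=
  (List.range n).flatMap fun r => (List.range n).map fun c => (r, c)

theorem nested_foldl {α β γ : Type} (L : List α) (M : α → List γ) (g : β → α → γ → β)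
    (init : β) :
    L.foldl (fun st r => (M r).foldl (fun st c => g st r c) st) init
      = (L.flatMap fun r => (M r).map fun c => (r, c)).foldl (fun st p => g st p.1 p.2) init := by
  induction L generalizing init with
  | nil => rfl
  | cons a L ih => simp [List.foldl_append, List.foldl_map, ih]

theorem mem_pvPairs {n : Nat} {p : Nat × Nat} : p ∈ pvPairs n ↔ p.1 < n ∧ p.2 < n := by
  obtain ⟨r, c⟩ := p
  simp [pvPairs, List.mem_flatMap, List.mem_map, List.mem_range, eq_comm, Prod.ext_iff]

theorem row_len {n : Nat} {res : List (List Int)} (h : Shaped n res) {i : Nat}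
    (hi : i < res.length) : (res[i]'hi).length = n :=
  h.2 _ (List.getElem_mem hi)

theorem shaped_set {n : Nat} {res : List (List Int)} (h : Shaped n res) (a b : Nat) :
    Shaped n (pvSetCell res a b) := by
  obtain ⟨h1, h2⟩ := h
  refine ⟨by simp [pvSetCell, h1], ?_⟩
  intro row hrow
  rw [List.mem_iff_getElem] at hrow
  obtain ⟨i, hi, hrow⟩ := hrow
  simp only [pvSetCell] at hrow
  rw [List.getElem_modify] at hrow
  split at hrow <;> rw [← hrow]
  · simpa using h2 _ (List.getElem_mem _)
  · exact h2 _ (List.getElem_mem _)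

theorem getR_eq_getElem {res : List (List Int)} {x y : Nat}
    (hx' : x < res.length) (hy' : y < (res[x]'hx').length) :
    getR res x y = (res[x]'hx')[y]'hy' := by
  simp [getR, List.getD_eq_getElem?_getD, List.getElem?_eq_getElem hx',
        List.getElem?_eq_getElem hy']

theorem getR_set {n : Nat} {res : List (List Int)} (h : Shaped n res) {x y : Nat} (a b : Nat)
    (hx : x < n) (hy : y < n) (ha : a < n) (hb : b < n) :
    getR (pvSetCell res a b) x y = if x = a ∧ y = b then (1 : Int) else getR res x y := by
  have hxl : x < res.length := h.1 ▸ hx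
  have hxm : x < (pvSetCell res a b).length := by simpa [pvSetCell] using hxl
  have hrowx : (res[x]'hxl).length = n := row_len h hxl
  have hym : y < ((pvSetCell res a b)[x]'hxm).length := by
    simp only [pvSetCell, List.getElem_modify]
    split <;> simp [hrowx, hy]
  rw [getR_eq_getElem hxm hym, getR_eq_getElem hxl (hrowx ▸ hy)]
  simp only [pvSetCell]
  by_cases hax : x = a
  · subst hax
    by_cases hby : y = b
    · subst hby
      simp
    · simp [Ne.symm hby, hby]
  · simp [Ne.symm hax, hax]

theorem shaped_ray {n : Nat} {b : List (List Int)} (dr dc : Int) :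
    ∀ (f : Nat) (s0 t0 : Int) (res : List (List Int)), Shaped n res →
      Shaped n (pvRay b dr dc f s0 t0 res) := by
  intro f
  induction f with
  | zero => intro s0 t0 res h; exact h
  | succ f ih =>
      intro s0 t0 res h
      by_cases hv : pvIsValid b s0 t0 = true
      · simp only [pvRay, hv, if_true]
        exact ih _ _ _ (shaped_set h _ _)
      · simp only [pvRay, hv]; exact h

-- validity at a point, unfolded
theorem valid_range {b : List (List Int)} {r c : Int} (h : pvIsValid b r c = true) :
    0 ≤ r ∧ r < (b.length : Int) ∧ 0 ≤ c ∧ c < (b.length : Int) ∧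
      pvGetB b r.toNat c.toNat ≠ 1 := by
  simpa [pvIsValid] using h

theorem ray_pres {n : Nat} {b : List (List Int)} (hn : n = b.length) {dr dc : Int}
    {x y : Nat} (hx : x < n) (hy : y < n) :
    ∀ (f : Nat) (s0 t0 : Int) (res : List (List Int)), Shaped n res →
      getR res x y = 1 → getR (pvRay b dr dc f s0 t0 res) x y = 1 := by
  intro f
  induction f with
  | zero => intro s0 t0 res _ h1; exact h1
  | succ f ih =>
      intro s0 t0 res h h1
      by_cases hv : pvIsValid b s0 t0 = true
      · simp only [pvRay, hv, if_true]
        obtain ⟨v1, v2, v3, v4, _⟩ := valid_range hv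
        refine ih _ _ _ (shaped_set h _ _) ?_
        rw [getR_set h _ _ hx hy (by omega) (by omega)]
        split <;> [rfl; exact h1]
      · simp only [pvRay, hv]; exact h1

theorem ray_hit {n : Nat} {b : List (List Int)} (hn : n = b.length) {dr dc : Int}
    {x y : Nat} (hx : x < n) (hy : y < n) :
    ∀ (f : Nat) (s0 t0 : Int) (res : List (List Int)), Shaped n res →
      RayHits b dr dc s0 t0 f x y → getR (pvRay b dr dc f s0 t0 res) x y = 1 := by
  intro f
  induction f with
  | zero => rintro s0 t0 res _ ⟨k, hk, _⟩; omega
  | succ f ih =>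
      rintro s0 t0 res h ⟨k, hk, hxk, hyk, hpre⟩
      have hv : pvIsValid b s0 t0 = true := by
        have := hpre 0 (Nat.zero_le _); simpa using this
      simp only [pvRay, hv, if_true]
      obtain ⟨v1, v2, v3, v4, _⟩ := valid_range hv
      cases k with
      | zero =>
          refine ray_pres hn hx hy _ _ _ _ (shaped_set h _ _) ?_
          rw [getR_set h _ _ hx hy (by omega) (by omega)]
          have : x = s0.toNat ∧ y = t0.toNat := by
            constructor <;> omega
          simp [this.1, this.2]
      | succ k =>
          refine ih _ _ _ (shaped_set h _ _) ⟨k, by omega, ?_, ?_, ?_⟩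
          · rw [hxk]; push_cast; ring
          · rw [hyk]; push_cast; ring
          · intro j hj
            have := hpre (j + 1) (by omega)
            have e1 : s0 + dr + (j : Int) * dr = s0 + ((j : Int) + 1) * dr := by ring
            have e2 : t0 + dc + (j : Int) * dc = t0 + ((j : Int) + 1) * dc := by ring
            rw [e1, e2]
            simpa [Nat.cast_add] using this

theorem ray_miss {n : Nat} {b : List (List Int)} (hn : n = b.length) {dr dc : Int}
    {x y : Nat} (hx : x < n) (hy : y < n) :
    ∀ (f : Nat) (s0 t0 : Int) (res : List (List Int)), Shaped n res →
      ¬ RayHits b dr dc s0 t0 f x y →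
      getR (pvRay b dr dc f s0 t0 res) x y = getR res x y := by
  intro f
  induction f with
  | zero => intro s0 t0 res _ _; rfl
  | succ f ih =>
      intro s0 t0 res h hno
      by_cases hv : pvIsValid b s0 t0 = true
      · simp only [pvRay, hv, if_true]
        obtain ⟨v1, v2, v3, v4, _⟩ := valid_range hv
        have hno' : ¬ RayHits b dr dc (s0 + dr) (t0 + dc) f x y := by
          rintro ⟨k, hk, hxk, hyk, hpre⟩
          refine hno ⟨k + 1, by omega, ?_, ?_, ?_⟩
          · rw [hxk]; push_cast; ring
          · rw [hyk]; push_cast; ring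
          · intro j hj
            cases j with
            | zero => simpa using hv
            | succ j =>
                have := hpre j (by omega)
                have e1 : s0 + ((j : Int) + 1) * dr = s0 + dr + (j : Int) * dr := by ring
                have e2 : t0 + ((j : Int) + 1) * dc = t0 + dc + (j : Int) * dc := by ring
                push_cast
                rw [e1, e2]; exact this
        have hne : ¬ (x = s0.toNat ∧ y = t0.toNat) := by
          rintro ⟨rfl, rfl⟩
          refine hno ⟨0, by omega, by omega, by omega, ?_⟩
          intro j hj
          have : j = 0 := by omega
          subst this; simpa using hv
        rw [ih _ _ _ (shaped_set h _ _) hno']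
        rw [getR_set h _ _ hx hy (by omega) (by omega)]
        simp [hne]
      · simp [pvRay, hv]

-- generic accumulation lemma for a fold that only writes 1s
theorem foldl_mark {α : Type} {n : Nat} {x y : Nat}
    (f : α → List (List Int) → List (List Int)) (P : α → Prop) :
    ∀ (l : List α),
    (∀ a ∈ l, ∀ res, Shaped n res → Shaped n (f a res)) →
    (∀ a ∈ l, ∀ res, Shaped n res → getR res x y = 1 → getR (f a res) x y = 1) →
    (∀ a ∈ l, ∀ res, Shaped n res → P a → getR (f a res) x y = 1) →
    (∀ a ∈ l, ∀ res, Shaped n res → ¬ P a → getR (f a res) x y = getR res x y) →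
    ∀ (res : List (List Int)), Shaped n res →
      (Shaped n (l.foldl (fun r a => f a r) res) ∧
       ((∃ a ∈ l, P a) → getR (l.foldl (fun r a => f a r) res) x y = 1) ∧
       (getR res x y = 1 → getR (l.foldl (fun r a => f a r) res) x y = 1) ∧
       ((¬ ∃ a ∈ l, P a) → getR (l.foldl (fun r a => f a r) res) x y = getR res x y)) := by
  intro l
  induction l with
  | nil => intro _ _ _ _ res h; exact ⟨h, by simp, by simp, by simp⟩
  | cons a l ih =>
      intro hshape hpres hhit hmiss res h
      have ha : a ∈ a :: l := List.mem_cons_self ..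
      obtain ⟨s1, s2, s3, s4⟩ :=
        ih (fun a' h' => hshape a' (List.mem_cons_of_mem _ h'))
           (fun a' h' => hpres a' (List.mem_cons_of_mem _ h'))
           (fun a' h' => hhit a' (List.mem_cons_of_mem _ h'))
           (fun a' h' => hmiss a' (List.mem_cons_of_mem _ h'))
           (f a res) (hshape a ha res h)
      refine ⟨s1, ?_, ?_, ?_⟩
      · rintro ⟨a', ha', hP⟩
        rcases List.mem_cons.mp ha' with rfl | hmem
        · exact s3 (hhit _ ha res h hP)
        · exact s2 ⟨a', hmem, hP⟩
      · intro h1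
        exact s3 (hpres _ ha res h h1)
      · intro hno
        have hPa : ¬ P a := fun hP => hno ⟨a, ha, hP⟩
        have := s4 (fun ⟨a', h1, h2⟩ => hno ⟨a', List.mem_cons_of_mem _ h1, h2⟩)
        simp only [List.foldl_cons] at *
        rw [this, hmiss _ ha res h hPa]

-- characterization of pvMark
theorem mark_char {b : List (List Int)} {x y : Nat} (hx : x < b.length) (hy : y < b.length)
    (r c : Int) (res : List (List Int)) (h : Shaped b.length res) :
    Shaped b.length (pvMark b r c res) ∧
    ((∃ d ∈ pvDirs, RayHits b d.1 d.2 (r + d.1) (c + d.2) b.length x y) →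
      getR (pvMark b r c res) x y = 1) ∧
    (getR res x y = 1 → getR (pvMark b r c res) x y = 1) ∧
    ((¬ ∃ d ∈ pvDirs, RayHits b d.1 d.2 (r + d.1) (c + d.2) b.length x y) →
      getR (pvMark b r c res) x y = getR res x y) := by
  exact foldl_mark (fun d res => pvRay b d.1 d.2 b.length (r + d.1) (c + d.2) res)
    (fun d => RayHits b d.1 d.2 (r + d.1) (c + d.2) b.length x y)
    pvDirs
    (fun d _ res h => shaped_ray _ _ _ _ _ _ h)
    (fun d _ res h h1 => ray_pres rfl hx hy _ _ _ _ h h1)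
    (fun d _ res h hP => ray_hit rfl hx hy _ _ _ _ h hP)
    (fun d _ res h hP => ray_miss rfl hx hy _ _ _ _ h hP)
    res h

-- characterization of A's full fold
theorem A_char {b : List (List Int)} {x y : Nat} (hx : x < b.length) (hy : y < b.length) :
    Shaped b.length (safe_cells b) ∧
    ((∃ p ∈ pvPairs b.length, AWrites b p x y) → getR (safe_cells b) x y = 1) ∧
    ((¬ ∃ p ∈ pvPairs b.length, AWrites b p x y) → getR (safe_cells b) x y = 0) := by
  have e : safe_cells b = (pvPairs b.length).foldl
      (fun st p => if pvGetB b p.1 p.2 = 1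
        then pvMark b (p.1 : Int) (p.2 : Int) (pvSetCell st p.1 p.2) else st)
      (List.replicate b.length (List.replicate b.length 0)) := by
    simp only [safe_cells]
    exact nested_foldl _ _ _ _
  have hinit : Shaped b.length (List.replicate b.length (List.replicate b.length (0 : Int))) := by
    refine ⟨List.length_replicate, ?_⟩
    intro row hrow
    rw [List.eq_of_mem_replicate hrow]
    exact List.length_replicate
  have hinit0 : getR (List.replicate b.length (List.replicate b.length (0 : Int))) x y = 0 := by
    have h1 : x < (List.replicate b.length (List.replicate b.length (0 : Int))).length := by
      simpa using hx
    rw [getR_eq_getElem h1 (by simpa using hy)]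
    simp
  obtain ⟨s1, s2, _, s4⟩ := foldl_mark
    (fun p st => if pvGetB b p.1 p.2 = 1
        then pvMark b (p.1 : Int) (p.2 : Int) (pvSetCell st p.1 p.2) else st)
    (fun p => AWrites b p x y)
    (pvPairs b.length)
    (by
      intro p hp res h
      obtain ⟨hp1, hp2⟩ := mem_pvPairs.mp hp
      by_cases hq : pvGetB b p.1 p.2 = 1
      · simpa [hq] using (mark_char hx hy (p.1 : Int) (p.2 : Int) _ (shaped_set h p.1 p.2)).1
      · simpa [hq] using h)
    (by
      intro p hp res h h1
      obtain ⟨hp1, hp2⟩ := mem_pvPairs.mp hp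
      by_cases hq : pvGetB b p.1 p.2 = 1
      · have h1' : getR (pvSetCell res p.1 p.2) x y = 1 := by
          rw [getR_set h _ _ hx hy hp1 hp2]; split <;> [rfl; exact h1]
        simpa [hq] using (mark_char hx hy (p.1 : Int) (p.2 : Int) _ (shaped_set h p.1 p.2)).2.2.1 h1'
      · simpa [hq] using h1)
    (by
      rintro p hp res h ⟨hq, hcase⟩
      obtain ⟨hp1, hp2⟩ := mem_pvPairs.mp hp
      rcases hcase with hpos | hray
      · have h1' : getR (pvSetCell res p.1 p.2) x y = 1 := by
          rw [getR_set h _ _ hx hy hp1 hp2]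
          have : x = p.1 ∧ y = p.2 := by
            obtain ⟨e1, e2⟩ := Prod.mk.injEq .. ▸ hpos
            exact ⟨e1, e2⟩
          simp [this]
        simpa [hq] using (mark_char hx hy (p.1 : Int) (p.2 : Int) _ (shaped_set h p.1 p.2)).2.2.1 h1'
      · simpa [hq] using (mark_char hx hy (p.1 : Int) (p.2 : Int) _ (shaped_set h p.1 p.2)).2.1 hray)
    (by
      intro p hp res h hno
      obtain ⟨hp1, hp2⟩ := mem_pvPairs.mp hp
      by_cases hq : pvGetB b p.1 p.2 = 1
      · have hnopos : ¬ ((x, y) = p) := fun hpos => hno ⟨hq, Or.inl hpos⟩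
        have hnoray : ¬ ∃ d ∈ pvDirs,
            RayHits b d.1 d.2 ((p.1 : Int) + d.1) ((p.2 : Int) + d.2) b.length x y :=
          fun hray => hno ⟨hq, Or.inr hray⟩
        have e2 := (mark_char hx hy (p.1 : Int) (p.2 : Int) _ (shaped_set h p.1 p.2)).2.2.2 hnoray
        have : ¬ (x = p.1 ∧ y = p.2) := by
          intro ⟨e1, e2⟩; exact hnopos (Prod.ext e1 e2)
        simp only [hq, ite_true]
        rw [e2, getR_set h _ _ hx hy hp1 hp2]
        simp [this]
      · simp [hq])
    (List.replicate b.length (List.replicate b.length 0)) hinit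
  rw [e]
  refine ⟨s1, fun hw => s2 hw, fun hno => ?_⟩
  rw [s4 hno, hinit0]

-- membership in a conditional-add set fold
theorem mem_condfold {α : Type} (cond : α → Prop) [DecidablePred cond] (f : α → Int) :
    ∀ (l : List α) (s : PySem.Set Int) (z : Int),
      (z ∈ l.foldl (fun s p => if cond p then PySem.Set.add s (f p) else s) s ↔
        z ∈ s ∨ ∃ p ∈ l, cond p ∧ z = f p) := by
  intro l
  induction l with
  | nil => intro s z; simp
  | cons a l ih =>
      intro s z
      by_cases hc : cond a
      · simp only [List.foldl_cons, if_pos hc, ih, PySem.Set.mem_add]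
        constructor
        · rintro ((h | rfl) | h)
          · exact Or.inl h
          · exact Or.inr ⟨a, List.mem_cons_self .., hc, rfl⟩
          · obtain ⟨p, hp, h1, h2⟩ := h
            exact Or.inr ⟨p, List.mem_cons_of_mem _ hp, h1, h2⟩
        · rintro (h | ⟨p, hp, h1, h2⟩)
          · exact Or.inl (Or.inl h)
          · rcases List.mem_cons.mp hp with rfl | hp'
            · exact Or.inl (Or.inr h2)
            · exact Or.inr ⟨p, hp', h1, h2⟩
      · simp only [List.foldl_cons, if_neg hc, ih]
        constructor
        · rintro (h | ⟨p, hp, h1, h2⟩)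
          · exact Or.inl h
          · exact Or.inr ⟨p, List.mem_cons_of_mem _ hp, h1, h2⟩
        · rintro (h | ⟨p, hp, h1, h2⟩)
          · exact Or.inl h
          · rcases List.mem_cons.mp hp with rfl | hp'
            · exact absurd h1 hc
            · exact Or.inr ⟨p, hp', h1, h2⟩

-- the 4-tuple fold of B splits into four independent set folds
theorem tuple_fold (b : List (List Int)) :
    ∀ (l : List (Nat × Nat)) (st : (PySem.Set Int × PySem.Set Int × PySem.Set Int × PySem.Set Int)),
      l.foldl (fun st p => if pvGetB b p.1 p.2 = 1 then
          (PySem.Set.add st.1 (p.1 : Int), PySem.Set.add st.2.1 (p.2 : Int),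
           PySem.Set.add st.2.2.1 ((p.1 : Int) - (p.2 : Int)),
           PySem.Set.add st.2.2.2 ((p.1 : Int) + (p.2 : Int)))
        else st) st
      = (l.foldl (fun s p => if pvGetB b p.1 p.2 = 1 then PySem.Set.add s ((p.1 : Nat) : Int) else s) st.1,
         l.foldl (fun s p => if pvGetB b p.1 p.2 = 1 then PySem.Set.add s ((p.2 : Nat) : Int) else s) st.2.1,
         l.foldl (fun s p => if pvGetB b p.1 p.2 = 1 then PySem.Set.add s ((p.1 : Int) - (p.2 : Int)) else s) st.2.2.1,
         l.foldl (fun s p => if pvGetB b p.1 p.2 = 1 then PySem.Set.add s ((p.1 : Int) + (p.2 : Int)) else s) st.2.2.2) := by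
  intro l
  induction l with
  | nil => intro st; rfl
  | cons a l ih =>
      intro st
      by_cases hc : pvGetB b a.1 a.2 = 1
      · simp only [List.foldl_cons, if_pos hc, ih]
      · simp only [List.foldl_cons, if_neg hc, ih]

-- B's output written via the pair list
theorem B_eq (b : List (List Int)) :
    safe_cells_alt b =
      (List.range b.length).map (fun (r : Nat) => (List.range b.length).map (fun (c : Nat) =>
        if (PySem.Set.contains ((pvPairs b.length).foldl
              (fun s p => if pvGetB b p.1 p.2 = 1 then PySem.Set.add s ((p.1 : Nat) : Int) else s)
              PySem.Set.empty) (r : Int) ||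
            PySem.Set.contains ((pvPairs b.length).foldl
              (fun s p => if pvGetB b p.1 p.2 = 1 then PySem.Set.add s ((p.2 : Nat) : Int) else s)
              PySem.Set.empty) (c : Int) ||
            PySem.Set.contains ((pvPairs b.length).foldl
              (fun s p => if pvGetB b p.1 p.2 = 1 then PySem.Set.add s ((p.1 : Int) - (p.2 : Int)) else s)
              PySem.Set.empty) ((r : Int) - (c : Int)) ||
            PySem.Set.contains ((pvPairs b.length).foldl
              (fun s p => if pvGetB b p.1 p.2 = 1 then PySem.Set.add s ((p.1 : Int) + (p.2 : Int)) else s)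
              PySem.Set.empty) ((r : Int) + (c : Int))) then (1 : Int) else 0)) := by
  simp only [safe_cells_alt]
  rw [nested_foldl (β := (PySem.Set Int × PySem.Set Int × PySem.Set Int × PySem.Set Int)) (List.range b.length) (fun _ => List.range b.length)
      (fun st r c => if pvGetB b r c = 1 then
        (PySem.Set.add st.1 (r : Int), PySem.Set.add st.2.1 (c : Int),
         PySem.Set.add st.2.2.1 ((r : Int) - (c : Int)), PySem.Set.add st.2.2.2 ((r : Int) + (c : Int)))
      else st)
      ((PySem.Set.empty, PySem.Set.empty, PySem.Set.empty, PySem.Set.empty) : (PySem.Set Int × PySem.Set Int × PySem.Set Int × PySem.Set Int))]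
  rw [tuple_fold b ((List.range b.length).flatMap fun r => (List.range b.length).map fun c => (r, c))]
  rfl

theorem mem_bfold (b : List (List Int)) (f : Nat × Nat → Int) (l : List (Nat × Nat)) (z : Int) :
    z ∈ l.foldl (fun s p => if pvGetB b p.1 p.2 = 1 then PySem.Set.add s (f p) else s)
        PySem.Set.empty ↔ ∃ p ∈ l, pvGetB b p.1 p.2 = 1 ∧ z = f p := by
  rw [mem_condfold (fun p => pvGetB b p.1 p.2 = 1) f l PySem.Set.empty z]
  simp [PySem.Set.empty]

theorem dirs_facts {d : Int × Int} (h : d ∈ pvDirs) :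
    (d.1 = -1 ∨ d.1 = 0 ∨ d.1 = 1) ∧ (d.2 = -1 ∨ d.2 = 0 ∨ d.2 = 1) ∧ ¬(d.1 = 0 ∧ d.2 = 0) := by
  simp only [pvDirs, List.mem_cons, List.not_mem_nil, or_false] at h
  rcases h with rfl | rfl | rfl | rfl | rfl | rfl | rfl | rfl <;> norm_num

theorem AW_to_LineM {b : List (List Int)} {x y : Nat}
    (h : ∃ p ∈ pvPairs b.length, AWrites b p x y) : LineM b x y := by
  obtain ⟨p, hp, hq, hcase⟩ := h
  obtain ⟨hp1, hp2⟩ := mem_pvPairs.mp hp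
  rcases hcase with hpos | ⟨d, hd, k, hk, hxe, hye, _⟩
  · obtain ⟨e1, e2⟩ : x = p.1 ∧ y = p.2 := by
      obtain ⟨a, b⟩ := Prod.mk.injEq .. ▸ hpos
      exact ⟨a, b⟩
    exact ⟨p.1, p.2, ⟨hp1, hp2, hq⟩, Or.inl (by omega)⟩
  · refine ⟨p.1, p.2, ⟨hp1, hp2, hq⟩, ?_⟩
    simp only [pvDirs, List.mem_cons, List.not_mem_nil, or_false] at hd
    rcases hd with rfl | rfl | rfl | rfl | rfl | rfl | rfl | rfl <;>
      dsimp only at hxe hye <;> omega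

-- completeness of ray marking: a cell on a queen's line, at distance m in direction d,
-- is written by A (induction on the distance, stepping to the blocking queen if any)
theorem AW_complete (b : List (List Int)) :
    ∀ m : Nat, ∀ (r c x y : Nat) (dr dc : Int), 1 ≤ m → Qn b r c →
      x < b.length → y < b.length → (dr, dc) ∈ pvDirs →
      (x : Int) = r + m * dr → (y : Int) = c + m * dc →
      ∃ p ∈ pvPairs b.length, AWrites b p x y := by
  intro m
  induction m using Nat.strong_induction_on with
  | _ m IH =>
  intro r c x y dr dc hm hq hx hy hd hxe hye
  by_cases hxy : pvGetB b x y = 1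
  · exact ⟨(x, y), mem_pvPairs.mpr ⟨hx, hy⟩, hxy, Or.inl rfl⟩
  · obtain ⟨hq1, hq2, hq3⟩ := hq
    have hdf := dirs_facts hd
    have hd1 := hdf.1
    have hd2 := hdf.2.1
    have hd0 := hdf.2.2
    have hmn : m < b.length := by
      clear hdf
      rcases hd1 with rfl | rfl | rfl <;> rcases hd2 with rfl | rfl | rfl <;> omega
    by_cases hpre : RayPre b dr dc ((r : Int) + dr) ((c : Int) + dc) (m - 1)
    · refine ⟨(r, c), mem_pvPairs.mpr ⟨hq1, hq2⟩, hq3,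
        Or.inr ⟨(dr, dc), hd, m - 1, by omega, ?_, ?_, hpre⟩⟩
      · have hc : ((m - 1 : Nat) : Int) = (m : Int) - 1 := by omega
        rw [hc, hxe]; ring
      · have hc : ((m - 1 : Nat) : Int) = (m : Int) - 1 := by omega
        rw [hc, hye]; ring
    · unfold RayPre at hpre
      push Not at hpre
      obtain ⟨j, hj, hnv⟩ := hpre
      have e1 : (r : Int) + dr + (j : Int) * dr = (r : Int) + ((j : Int) + 1) * dr := by ring
      have e2 : (c : Int) + dc + (j : Int) * dc = (c : Int) + ((j : Int) + 1) * dc := by ring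
      rw [e1, e2] at hnv
      have hi1 : (1 : Int) ≤ (j : Int) + 1 := by omega
      have him : (j : Int) + 1 ≤ (m : Int) := by omega
      -- blocker coordinates are on the board
      have hri : (0 : Int) ≤ (r : Int) + ((j : Int) + 1) * dr ∧
          (r : Int) + ((j : Int) + 1) * dr < (b.length : Int) ∧
          (0 : Int) ≤ (c : Int) + ((j : Int) + 1) * dc ∧
          (c : Int) + ((j : Int) + 1) * dc < (b.length : Int) := by
        clear hdf
        rcases hd1 with rfl | rfl | rfl <;> rcases hd2 with rfl | rfl | rfl <;> omega
      have hblock : pvGetB b ((r : Int) + ((j : Int) + 1) * dr).toNat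
          ((c : Int) + ((j : Int) + 1) * dc).toNat = 1 := by
        have h' : ¬ ((0 : Int) ≤ (r : Int) + ((j : Int) + 1) * dr ∧
            (r : Int) + ((j : Int) + 1) * dr < (b.length : Int) ∧
            (0 : Int) ≤ (c : Int) + ((j : Int) + 1) * dc ∧
            (c : Int) + ((j : Int) + 1) * dc < (b.length : Int) ∧
            pvGetB b ((r : Int) + ((j : Int) + 1) * dr).toNat
              ((c : Int) + ((j : Int) + 1) * dc).toNat ≠ 1) := by
          simpa [pvIsValid] using hnv
        by_contra hng
        exact h' ⟨hri.1, hri.2.1, hri.2.2.1, hri.2.2.2, hng⟩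
      have hlt : (j : Int) + 1 < (m : Int) := by
        by_contra hge
        have he : (j : Int) + 1 = (m : Int) := by omega
        rw [he] at hblock
        have ex : ((r : Int) + (m : Int) * dr).toNat = x := by omega
        have ey : ((c : Int) + (m : Int) * dc).toNat = y := by omega
        rw [ex, ey] at hblock
        exact hxy hblock
      refine IH (m - (j + 1)) (by omega) ((r : Int) + ((j : Int) + 1) * dr).toNat
        ((c : Int) + ((j : Int) + 1) * dc).toNat x y dr dc (by omega)
        ⟨by omega, by omega, hblock⟩ hx hy hd ?_ ?_
      · have er : ((((r : Int) + ((j : Int) + 1) * dr).toNat : Nat) : Int)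
            = (r : Int) + ((j : Int) + 1) * dr := Int.toNat_of_nonneg hri.1
        have ec : ((m - (j + 1) : Nat) : Int) = (m : Int) - ((j : Int) + 1) := by omega
        rw [er, ec, hxe]; ring
      · have er : ((((c : Int) + ((j : Int) + 1) * dc).toNat : Nat) : Int)
            = (c : Int) + ((j : Int) + 1) * dc := Int.toNat_of_nonneg hri.2.2.1
        have ec : ((m - (j + 1) : Nat) : Int) = (m : Int) - ((j : Int) + 1) := by omega
        rw [er, ec, hye]; ring

theorem LineM_to_AW {b : List (List Int)} {x y : Nat} (hx : x < b.length)
    (hy : y < b.length) (h : LineM b x y) : ∃ p ∈ pvPairs b.length, AWrites b p x y := by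
  obtain ⟨r, c, hq, hline⟩ := h
  by_cases hxy : x = r ∧ y = c
  · refine ⟨(x, y), mem_pvPairs.mpr ⟨hx, hy⟩, ?_, Or.inl rfl⟩
    rw [hxy.1, hxy.2]; exact hq.2.2
  · rcases hline with hl | hl | hl | hl
    · -- same row
      rcases Nat.lt_or_ge y c with hc | hc
      · exact AW_complete b (c - y) r c x y 0 (-1) (by omega) hq hx hy (by decide)
          (by omega) (by omega)
      · exact AW_complete b (y - c) r c x y 0 1 (by omega) hq hx hy (by decide)
          (by omega) (by omega)
    · -- same column
      rcases Nat.lt_or_ge x r with hr | hr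
      · exact AW_complete b (r - x) r c x y (-1) 0 (by omega) hq hx hy (by decide)
          (by omega) (by omega)
      · exact AW_complete b (x - r) r c x y 1 0 (by omega) hq hx hy (by decide)
          (by omega) (by omega)
    · -- same diagonal
      rcases Nat.lt_or_ge x r with hr | hr
      · exact AW_complete b (r - x) r c x y (-1) (-1) (by omega) hq hx hy (by decide)
          (by omega) (by omega)
      · exact AW_complete b (x - r) r c x y 1 1 (by omega) hq hx hy (by decide)
          (by omega) (by omega)
    · -- same anti-diagonal
      rcases Nat.lt_or_ge x r with hr | hr
      · exact AW_complete b (r - x) r c x y (-1) 1 (by omega) hq hx hy (by decide)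
          (by omega) (by omega)
      · exact AW_complete b (x - r) r c x y 1 (-1) (by omega) hq hx hy (by decide)
          (by omega) (by omega)

theorem B_cond_iff (b : List (List Int)) (x y : Nat) :
    (PySem.Set.contains ((pvPairs b.length).foldl
        (fun s p => if pvGetB b p.1 p.2 = 1 then PySem.Set.add s ((p.1 : Nat) : Int) else s)
        PySem.Set.empty) (x : Int) ||
     PySem.Set.contains ((pvPairs b.length).foldl
        (fun s p => if pvGetB b p.1 p.2 = 1 then PySem.Set.add s ((p.2 : Nat) : Int) else s)
        PySem.Set.empty) (y : Int) ||
     PySem.Set.contains ((pvPairs b.length).foldl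
        (fun s p => if pvGetB b p.1 p.2 = 1 then PySem.Set.add s ((p.1 : Int) - (p.2 : Int)) else s)
        PySem.Set.empty) ((x : Int) - (y : Int)) ||
     PySem.Set.contains ((pvPairs b.length).foldl
        (fun s p => if pvGetB b p.1 p.2 = 1 then PySem.Set.add s ((p.1 : Int) + (p.2 : Int)) else s)
        PySem.Set.empty) ((x : Int) + (y : Int))) = true ↔ LineM b x y := by
  rw [Bool.or_eq_true, Bool.or_eq_true, Bool.or_eq_true,
      PySem.Set.contains_iff, PySem.Set.contains_iff, PySem.Set.contains_iff,
      PySem.Set.contains_iff,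
      mem_bfold b (fun p => ((p.1 : Nat) : Int)),
      mem_bfold b (fun p => ((p.2 : Nat) : Int)),
      mem_bfold b (fun p => ((p.1 : Int) - (p.2 : Int))),
      mem_bfold b (fun p => ((p.1 : Int) + (p.2 : Int)))]
  constructor
  · rintro (((⟨p, hp, hq, he⟩ | ⟨p, hp, hq, he⟩) | ⟨p, hp, hq, he⟩) | ⟨p, hp, hq, he⟩) <;>
      obtain ⟨h1, h2⟩ := mem_pvPairs.mp hp
    · exact ⟨p.1, p.2, ⟨h1, h2, hq⟩, Or.inl he⟩
    · exact ⟨p.1, p.2, ⟨h1, h2, hq⟩, Or.inr (Or.inl he)⟩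
    · exact ⟨p.1, p.2, ⟨h1, h2, hq⟩, Or.inr (Or.inr (Or.inl he))⟩
    · exact ⟨p.1, p.2, ⟨h1, h2, hq⟩, Or.inr (Or.inr (Or.inr he))⟩
  · rintro ⟨r, c, ⟨h1, h2, hq⟩, hl | hl | hl | hl⟩
    · exact Or.inl (Or.inl (Or.inl ⟨(r, c), mem_pvPairs.mpr ⟨h1, h2⟩, hq, hl⟩))
    · exact Or.inl (Or.inl (Or.inr ⟨(r, c), mem_pvPairs.mpr ⟨h1, h2⟩, hq, hl⟩))
    · exact Or.inl (Or.inr ⟨(r, c), mem_pvPairs.mpr ⟨h1, h2⟩, hq, hl⟩)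
    · exact Or.inr ⟨(r, c), mem_pvPairs.mpr ⟨h1, h2⟩, hq, hl⟩

-- ===== VERDICT (by name: the statement is the Claim_ definition above) =====
theorem safe_cells_spec : Claim_equal_safe_cells := by
  unfold Claim_equal_safe_cells
  intro board _ _
  unfold Spec_safe_cells
  rcases Nat.eq_zero_or_pos board.length with h0 | hpos
  · have hA : safe_cells board = [] := by simp [safe_cells, h0]
    have hB : safe_cells_alt board = [] := by rw [B_eq]; simp [h0]
    rw [hA, hB]
  · obtain ⟨hsh, -, -⟩ := A_char (b := board) (x := 0) (y := 0) hpos hpos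
    rw [B_eq]
    apply List.ext_getElem
    · rw [hsh.1]; simp
    · intro i hi hi2
      have hin : i < board.length := by rw [← hsh.1]; exact hi
      apply List.ext_getElem
      · rw [row_len hsh hi]; simp
      · intro j hj hj2
        have hjn : j < board.length := by rw [← row_len hsh hi]; exact hj
        rw [← getR_eq_getElem hi hj]
        simp only [List.getElem_map, List.getElem_range]
        by_cases hL : LineM board i j
        · rw [(A_char hin hjn).2.1 (LineM_to_AW hin hjn hL)]
          have hc := (B_cond_iff board i j).mpr hL
          rw [hc]
          rfl
        · rw [(A_char hin hjn).2.2 (fun hw => hL (AW_to_LineM hw))]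
          have hc : (PySem.Set.contains ((pvPairs board.length).foldl
                (fun s p => if pvGetB board p.1 p.2 = 1 then PySem.Set.add s ((p.1 : Nat) : Int) else s)
                PySem.Set.empty) (i : Int) ||
              PySem.Set.contains ((pvPairs board.length).foldl
                (fun s p => if pvGetB board p.1 p.2 = 1 then PySem.Set.add s ((p.2 : Nat) : Int) else s)
                PySem.Set.empty) (j : Int) ||
              PySem.Set.contains ((pvPairs board.length).foldl
                (fun s p => if pvGetB board p.1 p.2 = 1 then PySem.Set.add s ((p.1 : Int) - (p.2 : Int)) else s)
                PySem.Set.empty) ((i : Int) - (j : Int)) ||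
              PySem.Set.contains ((pvPairs board.length).foldl
                (fun s p => if pvGetB board p.1 p.2 = 1 then PySem.Set.add s ((p.1 : Int) + (p.2 : Int)) else s)
                PySem.Set.empty) ((i : Int) + (j : Int))) = false :=
            Bool.eq_false_iff.mpr (fun h => hL ((B_cond_iff board i j).mp h))
          rw [hc]
          rfl
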